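-- pv_equiv track=rewrite | github.com/Mervyn-1/TOD-Chinese | utils/fnlp_utils.py | flatten_dial_history
-- ===== SOURCE A (Python) =====
-- from itertools import chain
--
-- def flatten_dial_history(dial_history, len_postfix, context_size, max_seq_len):
--     if context_size > 0:
--         context_size -= 1
--
--     if context_size == 0:
--         windowed_context = []
--     elif context_size > 0:
--         windowed_context = dial_history[-context_size:]
--     else:
--         windowed_context = dial_history
--
--     ctx_len = sum([len(c) for c in windowed_context])
--
--     spare_len = max_seq_len - len_postfix - 2
--     while ctx_len >= spare_len:
--         ctx_len -= len(windowed_context[0])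
--         windowed_context.pop(0)
--
--     context = list(chain(*windowed_context))
--
--     return context
-- ===== SOURCE B (Python) =====
-- from itertools import accumulate
--
-- def flatten_dial_history(dial_history, len_postfix, context_size, max_seq_len):
--     spare_len = max_seq_len - len_postfix - 2
--     if context_size == 0 or context_size == 1:
--         window = []
--     elif context_size > 1:
--         window = dial_history[-(context_size - 1):]
--     else:
--         window = dial_history
--     # prefix sums of turn lengths: drop the smallest front count k whose remaining total fits
--     total = sum(len(t) for t in window)
--     prefixes = [0] + list(accumulate(len(t) for t in window))
--     k = next(i for i, p in enumerate(prefixes) if total - p < spare_len)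
--     return [tok for turn in window[k:] for tok in turn]
-- ===== Notes on version B (the rewrite author's own statement) =====
-- stated objective: alternative
-- what changed: A drops turns by repeatedly popping the front of the window and re-testing a running total; B never mutates: it builds the prefix sums of the turn lengths once, finds the smallest front count k whose remaining total is below the budget with a single generator search, and flattens the suffix window[k:] with a comprehension.
import Mathlib
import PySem

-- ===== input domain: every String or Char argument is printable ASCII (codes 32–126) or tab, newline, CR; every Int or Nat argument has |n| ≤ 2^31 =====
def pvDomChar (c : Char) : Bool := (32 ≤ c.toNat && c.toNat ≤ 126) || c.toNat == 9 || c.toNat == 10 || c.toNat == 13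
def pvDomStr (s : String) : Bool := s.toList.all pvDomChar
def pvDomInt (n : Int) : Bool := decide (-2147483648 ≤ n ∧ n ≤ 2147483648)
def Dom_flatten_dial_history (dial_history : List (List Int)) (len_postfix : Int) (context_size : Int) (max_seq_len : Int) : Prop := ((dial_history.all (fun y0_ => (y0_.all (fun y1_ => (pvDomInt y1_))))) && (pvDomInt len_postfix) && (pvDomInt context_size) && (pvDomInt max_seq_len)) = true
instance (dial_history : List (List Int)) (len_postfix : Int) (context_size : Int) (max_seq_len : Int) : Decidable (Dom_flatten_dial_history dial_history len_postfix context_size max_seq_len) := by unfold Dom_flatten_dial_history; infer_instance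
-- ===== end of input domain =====

-- B replaces A's destructive pop(0)-and-retest loop by one prefix-sum pass and a single search for
-- the smallest front count to drop, then flattens the surviving suffix; equivalence is about the
-- RETURN value only (A mutates the aliased dial_history via pop in the context_size <= 0 branch,
-- B does not mutate anything).

-- ===== PORT A =====
-- the `while ctx_len >= spare_len: ctx_len -= len(wc[0]); wc.pop(0)` loop; on [] with
-- ctx_len ≥ spare_len Python raises IndexError (excluded by Pre_), the port returns [].
def pvPopLoop (spare : Int) (ctxLen : Int) : List (List Int) → List (List Int)
  | [] => []
  | h :: t => if ctxLen ≥ spare then pvPopLoop spare (ctxLen - (h.length : Int)) t else h :: t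

def flatten_dial_history (dial_history : List (List Int)) (len_postfix : Int) (context_size : Int) (max_seq_len : Int) : List Int :=
  let cs : Int := if context_size > 0 then context_size - 1 else context_size
  let windowed_context : List (List Int) :=
    if cs = 0 then []
    else if cs > 0 then PySem.List.slice dial_history (some (-cs)) none
    else dial_history
  let ctx_len : Int := (windowed_context.map (fun c => (c.length : Int))).sum
  let spare_len : Int := max_seq_len - len_postfix - 2
  (pvPopLoop spare_len ctx_len windowed_context).flatten

-- ===== PORT B =====
-- Source B's `[0] + list(accumulate(lengths))` is List.scanl (+) 0, and its
-- `next(i for i, p in enumerate(prefixes) if total - p < spare_len)` is findIdx?; when the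
-- generator is exhausted Python raises StopIteration (excluded by Pre_), the port returns [].
def flatten_dial_history_alt (dial_history : List (List Int)) (len_postfix : Int) (context_size : Int) (max_seq_len : Int) : List Int :=
  let spare_len : Int := max_seq_len - len_postfix - 2
  let window : List (List Int) :=
    if context_size = 0 ∨ context_size = 1 then []
    else if context_size > 1 then PySem.List.slice dial_history (some (-(context_size - 1))) none
    else dial_history
  let total : Int := (window.map (fun t => (t.length : Int))).sum
  let prefixes : List Int := List.scanl (· + ·) 0 (window.map (fun t => (t.length : Int)))
  match prefixes.findIdx? (fun p => decide (total - p < spare_len)) with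
  | some k => (window.drop k).flatten
  | none => []

-- ===== PRECONDITION & SPEC =====
-- Pre_ excludes exactly the inputs on which Python A raises IndexError: when the budget
-- max_seq_len - len_postfix - 2 is <= 0 even the empty context is over budget, so A's pop
-- loop empties windowed_context and then indexes the empty list (B's search raises
-- StopIteration on exactly the same inputs).
def Pre_flatten_dial_history (dial_history : List (List Int)) (len_postfix : Int) (context_size : Int) (max_seq_len : Int) : Prop :=
  0 < max_seq_len - len_postfix - 2
instance (dial_history : List (List Int)) (len_postfix : Int) (context_size : Int) (max_seq_len : Int) : Decidable (Pre_flatten_dial_history dial_history len_postfix context_size max_seq_len) := by unfold Pre_flatten_dial_history; infer_instance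

def pvWitness_flatten_dial_history : List (List Int) × Int × Int × Int := ([[1, 2], [3]], 0, -1, 10)

def Spec_flatten_dial_history (dial_history : List (List Int)) (len_postfix : Int) (context_size : Int) (max_seq_len : Int) (out : List Int) : Prop := out = flatten_dial_history_alt dial_history len_postfix context_size max_seq_len
instance (dial_history : List (List Int)) (len_postfix : Int) (context_size : Int) (max_seq_len : Int) (out : List Int) : Decidable (Spec_flatten_dial_history dial_history len_postfix context_size max_seq_len out) := by unfold Spec_flatten_dial_history; infer_instance

-- ===== CLAIM =====
def Claim_equal_flatten_dial_history : Prop := ∀ (dial_history : List (List Int)) (len_postfix : Int) (context_size : Int) (max_seq_len : Int), Dom_flatten_dial_history dial_history len_postfix context_size max_seq_len → Pre_flatten_dial_history dial_history len_postfix context_size max_seq_len → Spec_flatten_dial_history dial_history len_postfix context_size max_seq_len (flatten_dial_history dial_history len_postfix context_size max_seq_len)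

-- ===== LEMMAS AND PROOFS =====

def pvSumLen (ws : List (List Int)) : Int := (ws.map (fun c => (c.length : Int))).sum

theorem pvSumLen_cons (h : List Int) (t : List (List Int)) :
    pvSumLen (h :: t) = (h.length : Int) + pvSumLen t := by
  simp [pvSumLen]

-- running sums started at a + b are the shift by a of those started at b
theorem pvScanl_add_shift (a : Int) :
    ∀ (L : List Int) (b : Int),
      List.scanl (· + ·) (a + b) L = (List.scanl (· + ·) b L).map (a + ·) := by
  intro L
  induction L with
  | nil => intro b; simp
  | cons x L ih =>
      intro b
      rw [List.scanl_cons, List.scanl_cons, List.map_cons,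
          show a + b + x = a + (b + x) by ring, ih (b + x)]

-- A's pop-front loop (started at the exact total) drops precisely the count B's search finds
theorem pvPopLoop_eq_findIdx_core (spare : Int) :
    ∀ (ws : List (List Int)),
      pvPopLoop spare (pvSumLen ws) ws
        = (match (List.scanl (· + ·) 0 (ws.map (fun t => (t.length : Int)))).findIdx?
              (fun p => decide (pvSumLen ws - p < spare)) with
           | some k => ws.drop k
           | none => []) := by
  intro ws
  induction ws with
  | nil =>
      by_cases h : (0 : Int) < spare
      · simp [pvPopLoop, pvSumLen, List.findIdx?_cons, h]
      · simp [pvPopLoop, pvSumLen, List.findIdx?_cons, h]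
  | cons h t ih =>
      rw [List.map_cons, List.scanl_cons, List.findIdx?_cons]
      by_cases hc : pvSumLen (h :: t) ≥ spare
      · have hnot : ¬ (pvSumLen (h :: t) - 0 < spare) := by omega
        rw [if_neg (by simpa using hnot)]
        have h1 : pvSumLen (h :: t) - (h.length : Int) = pvSumLen t := by
          rw [pvSumLen_cons]; ring
        simp only [pvPopLoop, if_pos hc, h1, ih]
        rw [show (0 : Int) + (h.length : Int) = (h.length : Int) + 0 by ring,
            pvScanl_add_shift (h.length : Int) (t.map (fun t => (t.length : Int))) 0,
            List.findIdx?_map,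
            show ((fun p => decide (pvSumLen (h :: t) - p < spare)) ∘ ((h.length : Int) + ·))
              = fun p => decide (pvSumLen t - p < spare) by
                funext p
                simp only [Function.comp_apply, decide_eq_decide, pvSumLen_cons]
                omega]
        cases (List.scanl (· + ·) (0 : Int) (t.map (fun t => (t.length : Int)))).findIdx?
            (fun p => decide (pvSumLen t - p < spare)) with
        | none => rfl
        | some k => simp [List.drop_succ_cons]
      · have hlt : pvSumLen (h :: t) - 0 < spare := by omega
        rw [if_pos (by simpa using hlt)]
        simp [pvPopLoop, if_neg hc]

-- the flattened form of the same fact, as the two ports state it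
theorem pvPopLoop_eq_findIdx (spare : Int) (ws : List (List Int)) :
    (pvPopLoop spare (pvSumLen ws) ws).flatten
      = (match (List.scanl (· + ·) 0 (ws.map (fun t => (t.length : Int)))).findIdx?
            (fun p => decide (pvSumLen ws - p < spare)) with
         | some k => (ws.drop k).flatten
         | none => []) := by
  rw [pvPopLoop_eq_findIdx_core]
  cases (List.scanl (· + ·) (0 : Int) (ws.map (fun t => (t.length : Int)))).findIdx?
      (fun p => decide (pvSumLen ws - p < spare)) with
  | none => rfl
  | some k => rfl

-- the two window-building branchings coincide
theorem pvWindow_eq (dial_history : List (List Int)) (context_size : Int) :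
    (if (if context_size > 0 then context_size - 1 else context_size) = 0 then ([] : List (List Int))
     else if (if context_size > 0 then context_size - 1 else context_size) > 0 then
       PySem.List.slice dial_history (some (-(if context_size > 0 then context_size - 1 else context_size))) none
     else dial_history)
    = (if context_size = 0 ∨ context_size = 1 then ([] : List (List Int))
       else if context_size > 1 then PySem.List.slice dial_history (some (-(context_size - 1))) none
       else dial_history) := by
  by_cases h0 : context_size = 0
  · simp [h0]
  · by_cases h1 : context_size = 1
    · simp [h1]
    · by_cases h2 : context_size > 1
      · have hpos : context_size > 0 := by omega
        simp only [if_pos hpos, if_pos h2]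
        rw [if_neg (by omega : ¬ (context_size - 1 = 0)),
            if_pos (by omega : context_size - 1 > 0),
            if_neg (by tauto : ¬ (context_size = 0 ∨ context_size = 1))]
      · have hneg : ¬ context_size > 0 := by omega
        rw [if_neg hneg, if_neg h0, if_neg hneg, if_neg h2,
            if_neg (by tauto : ¬ (context_size = 0 ∨ context_size = 1))]

-- ===== VERDICT =====
theorem flatten_dial_history_spec : Claim_equal_flatten_dial_history := by
  intro dh lp cs ms _ _
  show flatten_dial_history dh lp cs ms = flatten_dial_history_alt dh lp cs ms
  unfold flatten_dial_history flatten_dial_history_alt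
  dsimp only
  rw [pvWindow_eq dh cs]
  exact pvPopLoop_eq_findIdx _ _
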